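-- pv_equiv track=rewrite | github.com/16010948/Algorithm | Programmers/dev_matching2.py | solution
-- ===== SOURCE A (Python) =====
-- def quick_sort(array, start, end):
--     if start >= end:
--         return
--
--     pivot = start
--     left = start + 1
--     right = end
--     while left <= right:
--         while left <= end and array[left] <= array[pivot]:
--             left += 1
--         while right > start and array[right] >= array[pivot]:
--             right -= 1
--         if left > right:
--             array[pivot], array[right] = array[right], array[pivot]
--         else:
--             array[left], array[right] = array[right], array[left]
--
--     quick_sort(array, start, right - 1)
--     quick_sort(array, right + 1, end)
--
-- def binary_search(array, target):
--     start = 0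
--     end = len(array) - 1
--
--     while start <= end:
--         mid = (start + end) // 2
--         if array[mid] == target:
--             return mid
--         elif array[mid] < target:
--             start = mid + 1
--         else:
--             end = mid - 1
--     return -1
--
-- def solution(lottos, win_nums):
--     answer = []
--     LOTTO = 6
--
--     quick_sort(win_nums, 0, LOTTO - 1)
--     blurry = 0
--     correct = 0
--     visited = [False] * LOTTO
--     for i in range(LOTTO):
--         if lottos[i] == 0:
--             blurry += 1
--             continue
--         if binary_search(win_nums, lottos[i]) >= 0:
--             correct += 1
--
--     answer = [min(LOTTO, LOTTO - (correct + blurry) + 1), min(LOTTO, LOTTO - correct + 1)]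
--     return answer
-- ===== SOURCE B (Python) =====
-- def solution(lottos, win_nums):
--     LOTTO = 6
--     picks = [lottos[i] for i in range(LOTTO)]
--     win_nums[:LOTTO] = sorted(win_nums[:LOTTO])
--
--     def find(lo, hi, x):
--         if lo > hi:
--             return False
--         mid = (lo + hi) // 2
--         if win_nums[mid] == x:
--             return True
--         if win_nums[mid] < x:
--             return find(mid + 1, hi, x)
--         return find(lo, mid - 1, x)
--
--     blurry = picks.count(0)
--     correct = sum(1 for x in picks if x != 0 and find(0, len(win_nums) - 1, x))
--     return [min(LOTTO, LOTTO - (correct + blurry) + 1), min(LOTTO, LOTTO - correct + 1)]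
-- ===== Notes on version B (the rewrite author's own statement) =====
-- stated objective: simpler
-- what changed: Replaces the hand-written in-place quicksort by the idiomatic slice assignment win_nums[:6] = sorted(win_nums[:6]) (the same caller-visible mutation A makes), the iterative index-returning binary search by a small recursive boolean one with the same probe sequence, and the counting loop with its unused 'visited' list by count()/sum over the six ticket entries.
import Mathlib
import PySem

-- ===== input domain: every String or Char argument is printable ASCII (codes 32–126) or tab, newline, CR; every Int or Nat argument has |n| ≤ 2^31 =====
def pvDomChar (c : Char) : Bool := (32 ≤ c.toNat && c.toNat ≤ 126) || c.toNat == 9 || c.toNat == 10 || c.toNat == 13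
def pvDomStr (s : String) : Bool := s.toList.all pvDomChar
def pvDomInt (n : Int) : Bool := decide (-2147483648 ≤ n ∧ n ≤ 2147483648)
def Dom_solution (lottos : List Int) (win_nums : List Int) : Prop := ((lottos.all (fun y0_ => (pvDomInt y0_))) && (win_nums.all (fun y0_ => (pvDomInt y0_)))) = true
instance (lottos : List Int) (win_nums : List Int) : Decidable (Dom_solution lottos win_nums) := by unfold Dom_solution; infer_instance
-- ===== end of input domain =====

-- B replaces the hand-written quicksort by the slice assignment win_nums[:6] = sorted(win_nums[:6])
-- (performing the SAME in-place mutation of win_nums as A), the iterative index-returning binary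
-- search by a small recursive boolean one, and the index loop with its unused 'visited' list by
-- count()/sum over the six ticket entries; the theorems below are about the return value.


-- ===== PORT A =====
-- Python's array[i] / array[i] = v: on every execution admitted by Pre_solution all indices are
-- in range, where pyGetD / pySetD are exact.
def pyGetA (a : List Int) (i : Int) : Int := PySem.List.pyGetD a i 0

-- 'array[i], array[j] = array[j], array[i]'
def pySwapA (a : List Int) (i j : Int) : List Int :=
  PySem.List.pySetD (PySem.List.pySetD a i (pyGetA a j)) j (pyGetA a i)

-- 'while left <= end and array[left] <= array[pivot]: left += 1'
def qsLeft (a : List Int) (pivot e l : Int) : Int :=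
  if h : l ≤ e ∧ pyGetA a l ≤ pyGetA a pivot then qsLeft a pivot e (l + 1) else l
termination_by (e + 1 - l).toNat
decreasing_by obtain ⟨h1, _⟩ := h; omega

-- 'while right > start and array[right] >= array[pivot]: right -= 1'
def qsRight (a : List Int) (start pivot r : Int) : Int :=
  if h : r > start ∧ pyGetA a r ≥ pyGetA a pivot then qsRight a start pivot (r - 1) else r
termination_by (r - start).toNat
decreasing_by obtain ⟨h1, _⟩ := h; omega

-- the 'while left <= right' partition loop; fuel only bounds the iteration count (the sufficiency
-- of the fuel passed below is proved in qsOuter_spec), the body is Python's loop body verbatim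
def qsOuter (fuel : Nat) (a : List Int) (start pivot e left right : Int) : List Int × Int :=
  match fuel with
  | 0 => (a, right)
  | f + 1 =>
    if left ≤ right then
      let l := qsLeft a pivot e left
      let r := qsRight a start pivot right
      if l > r then qsOuter f (pySwapA a pivot r) start pivot e l r
      else qsOuter f (pySwapA a l r) start pivot e l r
    else (a, right)

-- quick_sort(array, start, end); fuel bounds the recursion depth (sufficiency proved in qsA_spec)
def quickSortA (fuel : Nat) (a : List Int) (start e : Int) : List Int :=
  match fuel with
  | 0 => a
  | f + 1 =>
    if start ≥ e then a
    else
      let pivot := start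
      let res := qsOuter (2 * (e - start).toNat + 4) a start pivot e (start + 1) e
      quickSortA f (quickSortA f res.1 start (res.2 - 1)) (res.2 + 1) e

-- binary_search's while loop
def bsLoop (a : List Int) (target s e : Int) : Int :=
  if h : s ≤ e then
    if pyGetA a (PySem.Int.floordiv (s + e) 2) = target then PySem.Int.floordiv (s + e) 2
    else if pyGetA a (PySem.Int.floordiv (s + e) 2) < target then
      bsLoop a target (PySem.Int.floordiv (s + e) 2 + 1) e
    else bsLoop a target s (PySem.Int.floordiv (s + e) 2 - 1)
  else -1
termination_by (e + 1 - s).toNat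
decreasing_by
  · have := PySem.Int.floordiv_two_mid_bounds h; omega
  · have := PySem.Int.floordiv_two_mid_bounds h; omega

def binarySearch (a : List Int) (target : Int) : Int :=
  bsLoop a target 0 ((a.length : Int) - 1)

def solution (lottos : List Int) (win_nums : List Int) : List Int :=
  let LOTTO : Int := 6
  let sortedW := quickSortA ((LOTTO - 1 - 0).toNat + 1) win_nums 0 (LOTTO - 1)
  let _visited := List.replicate LOTTO.toNat false  -- Python's 'visited' (never read)
  let bc :=
    (PySem.List.pyRange 0 LOTTO 1).foldl
      (fun (st : Int × Int) i =>
        if PySem.List.pyGetD lottos i 0 = 0 then (st.1 + 1, st.2)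
        else if binarySearch sortedW (PySem.List.pyGetD lottos i 0) ≥ 0 then (st.1, st.2 + 1)
        else st)
      (0, 0)
  [min LOTTO (LOTTO - (bc.2 + bc.1) + 1), min LOTTO (LOTTO - bc.2 + 1)]

-- ===== PORT B =====
-- Source B's recursive boolean binary search 'find' over the (partially) sorted win_nums
def bsFind (ws : List Int) (lo hi x : Int) : Bool :=
  if h : lo > hi then false
  else if pyGetA ws (PySem.Int.floordiv (lo + hi) 2) = x then true
  else if pyGetA ws (PySem.Int.floordiv (lo + hi) 2) < x then
    bsFind ws (PySem.Int.floordiv (lo + hi) 2 + 1) hi x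
  else bsFind ws lo (PySem.Int.floordiv (lo + hi) 2 - 1) x
termination_by (hi + 1 - lo).toNat
decreasing_by
  · have := PySem.Int.floordiv_two_mid_bounds (by omega : lo ≤ hi); omega
  · have := PySem.Int.floordiv_two_mid_bounds (by omega : lo ≤ hi); omega

def solution_alt (lottos : List Int) (win_nums : List Int) : List Int :=
  let LOTTO : Int := 6
  let picks := (PySem.List.pyRange 0 LOTTO 1).map (fun i => PySem.List.pyGetD lottos i 0)
  -- 'win_nums[:LOTTO] = sorted(win_nums[:LOTTO])': the list find searches afterwards
  let ws := PySem.List.sorted (PySem.List.slice win_nums none (some LOTTO)) (fun x => x)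
              ++ PySem.List.slice win_nums (some LOTTO) none
  let blurry : Int := PySem.List.count picks 0
  let correct : Int :=
    ((picks.filter (fun x => !(x == 0) && bsFind ws 0 (PySem.List.len ws - 1) x)).map
      (fun _ => (1 : Int))).sum
  [min LOTTO (LOTTO - (correct + blurry) + 1), min LOTTO (LOTTO - correct + 1)]

-- ===== PRECONDITION & SPEC =====
-- Pre_: exactly the inputs on which the Python A returns: each list needs at least six entries
-- (A raises IndexError below that); A reads only lottos[0:6] and sorts only win_nums[0:6].
def Pre_solution (lottos : List Int) (win_nums : List Int) : Prop :=
  6 ≤ lottos.length ∧ 6 ≤ win_nums.length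
instance (lottos : List Int) (win_nums : List Int) : Decidable (Pre_solution lottos win_nums) := by
  unfold Pre_solution; infer_instance

def pvWitness_solution : List Int × List Int := ([44, 1, 0, 0, 31, 25], [31, 10, 45, 1, 6, 19])

def Spec_solution (lottos : List Int) (win_nums : List Int) (out : List Int) : Prop := out = solution_alt lottos win_nums
instance (lottos : List Int) (win_nums : List Int) (out : List Int) : Decidable (Spec_solution lottos win_nums out) := by unfold Spec_solution; infer_instance

-- ===== CLAIM (what is proved, stated in full; the proofs are below) =====
def Claim_equal_solution : Prop := ∀ (lottos : List Int) (win_nums : List Int), Dom_solution lottos win_nums → Pre_solution lottos win_nums → Spec_solution lottos win_nums (solution lottos win_nums)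

-- ===== LEMMAS AND PROOFS =====

theorem pyGetA_eq (a : List Int) (i : Int) (h0 : 0 ≤ i) (h1 : i < (a.length : Int)) :
    pyGetA a i = a[i.toNat]'(by omega) := by
  simpa [pyGetA] using PySem.List.pyGetD_eq_getElem (xs := a) (i := i) (d := 0) h0 h1

theorem pyGetA_oob (a : List Int) (i : Int) (h : (a.length : Int) ≤ i) : pyGetA a i = 0 := by
  have : PySem.List.pyGet? a i = none := by
    rw [PySem.List.pyGet?_eq_none_iff]
    simp [PySem.Raise.InRange]; omega
  simp [pyGetA, PySem.List.pyGetD, this]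

theorem length_pySwapA (a : List Int) (i j : Int) (hi0 : 0 ≤ i) (hj0 : 0 ≤ j) :
    (pySwapA a i j).length = a.length := by
  simp [pySwapA, PySem.List.pySetD_of_nonneg, hi0, hj0]

theorem pySwapA_eq_set (a : List Int) (i j : Int) (hi0 : 0 ≤ i) (hi : i < (a.length : Int))
    (hj0 : 0 ≤ j) (hj : j < (a.length : Int)) :
    pySwapA a i j = (a.set i.toNat (a[j.toNat]'(by omega))).set j.toNat (a[i.toNat]'(by omega)) := by
  rw [pySwapA, PySem.List.pySetD_of_nonneg a _ hi0, PySem.List.pySetD_of_nonneg _ _ hj0,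
    pyGetA_eq a i hi0 hi, pyGetA_eq a j hj0 hj]

theorem perm_pySwapA (a : List Int) (i j : Int) (hi0 : 0 ≤ i) (hi : i < (a.length : Int))
    (hj0 : 0 ≤ j) (hj : j < (a.length : Int)) : (pySwapA a i j).Perm a := by
  rw [pySwapA_eq_set a i j hi0 hi hj0 hj]
  exact List.set_set_perm (by omega) (by omega)

theorem pyGetA_pySwapA (a : List Int) (i j : Int) (hi0 : 0 ≤ i) (hi : i < (a.length : Int))
    (hj0 : 0 ≤ j) (hj : j < (a.length : Int)) (k : Int) (hk0 : 0 ≤ k) :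
    pyGetA (pySwapA a i j) k =
      if k = j then pyGetA a i else if k = i then pyGetA a j else pyGetA a k := by
  rw [pySwapA_eq_set a i j hi0 hi hj0 hj]
  by_cases hk : k < (a.length : Int)
  · rw [pyGetA_eq _ k hk0 (by simp; omega), pyGetA_eq a k hk0 hk,
      pyGetA_eq a i hi0 hi, pyGetA_eq a j hj0 hj]
    simp only [List.getElem_set]
    split_ifs <;> first | rfl | omega
  · rw [pyGetA_oob a k (by omega), pyGetA_oob _ k (by simp; omega)]
    rw [if_neg (by omega), if_neg (by omega)]

-- ---- scan-loop lemmas ----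

theorem qsLeft_ge (a : List Int) (pivot e : Int) : ∀ l, l ≤ qsLeft a pivot e l := by
  apply qsLeft.induct a pivot e (motive := fun l => l ≤ qsLeft a pivot e l)
  · intro x h ih; rw [qsLeft, dif_pos h]; omega
  · intro x h; rw [qsLeft, dif_neg h]

theorem qsLeft_le (a : List Int) (pivot e : Int) : ∀ l, l ≤ e + 1 → qsLeft a pivot e l ≤ e + 1 := by
  apply qsLeft.induct a pivot e (motive := fun l => l ≤ e + 1 → qsLeft a pivot e l ≤ e + 1)
  · intro x h ih _; rw [qsLeft, dif_pos h]; exact ih (by omega)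
  · intro x h hx; rwa [qsLeft, dif_neg h]

theorem qsLeft_scan (a : List Int) (pivot e : Int) :
    ∀ l, ∀ j, l ≤ j → j < qsLeft a pivot e l → pyGetA a j ≤ pyGetA a pivot := by
  apply qsLeft.induct a pivot e
    (motive := fun l => ∀ j, l ≤ j → j < qsLeft a pivot e l → pyGetA a j ≤ pyGetA a pivot)
  · intro x h ih j hj1 hj2
    rw [qsLeft, dif_pos h] at hj2
    rcases eq_or_lt_of_le hj1 with rfl | hlt
    · exact h.2
    · exact ih j (by omega) hj2
  · intro x h j hj1 hj2
    rw [qsLeft, dif_neg h] at hj2; omega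

theorem qsLeft_stop (a : List Int) (pivot e : Int) :
    ∀ l, qsLeft a pivot e l ≤ e → pyGetA a pivot < pyGetA a (qsLeft a pivot e l) := by
  apply qsLeft.induct a pivot e
    (motive := fun l => qsLeft a pivot e l ≤ e → pyGetA a pivot < pyGetA a (qsLeft a pivot e l))
  · intro x h ih hle
    rw [qsLeft, dif_pos h] at hle ⊢; exact ih hle
  · intro x h hle
    rw [qsLeft, dif_neg h] at hle ⊢
    rcases not_and_or.mp h with h' | h'
    · omega
    · omega

theorem qsLeft_advance (a : List Int) (pivot e l : Int) (h1 : l ≤ e)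
    (h2 : pyGetA a l ≤ pyGetA a pivot) : l + 1 ≤ qsLeft a pivot e l := by
  rw [qsLeft, dif_pos ⟨h1, h2⟩]; exact qsLeft_ge a pivot e (l + 1)

theorem qsRight_le (a : List Int) (start pivot : Int) : ∀ r, qsRight a start pivot r ≤ r := by
  apply qsRight.induct a start pivot (motive := fun r => qsRight a start pivot r ≤ r)
  · intro x h ih; rw [qsRight, dif_pos h]; omega
  · intro x h; rw [qsRight, dif_neg h]

theorem qsRight_ge (a : List Int) (start pivot : Int) :
    ∀ r, start ≤ r → start ≤ qsRight a start pivot r := by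
  apply qsRight.induct a start pivot
    (motive := fun r => start ≤ r → start ≤ qsRight a start pivot r)
  · intro x h ih _; rw [qsRight, dif_pos h]; exact ih (by omega)
  · intro x h hx; rwa [qsRight, dif_neg h]

theorem qsRight_scan (a : List Int) (start pivot : Int) :
    ∀ r, ∀ j, qsRight a start pivot r < j → j ≤ r → pyGetA a pivot ≤ pyGetA a j := by
  apply qsRight.induct a start pivot
    (motive := fun r => ∀ j, qsRight a start pivot r < j → j ≤ r → pyGetA a pivot ≤ pyGetA a j)
  · intro x h ih j hj1 hj2
    rw [qsRight, dif_pos h] at hj1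
    rcases eq_or_lt_of_le hj2 with rfl | hlt
    · exact h.2
    · exact ih j hj1 (by omega)
  · intro x h j hj1 hj2
    rw [qsRight, dif_neg h] at hj1; omega

theorem qsRight_stop (a : List Int) (start pivot : Int) :
    ∀ r, start < qsRight a start pivot r → pyGetA a (qsRight a start pivot r) < pyGetA a pivot := by
  apply qsRight.induct a start pivot
    (motive := fun r =>
      start < qsRight a start pivot r → pyGetA a (qsRight a start pivot r) < pyGetA a pivot)
  · intro x h ih hlt
    rw [qsRight, dif_pos h] at hlt ⊢; exact ih hlt
  · intro x h hlt
    rw [qsRight, dif_neg h] at hlt ⊢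
    rcases not_and_or.mp h with h' | h'
    · omega
    · omega

theorem qsRight_advance (a : List Int) (start pivot r : Int) (h1 : start < r)
    (h2 : pyGetA a pivot ≤ pyGetA a r) : qsRight a start pivot r ≤ r - 1 := by
  rw [qsRight, dif_pos ⟨h1, h2⟩]; exact qsRight_le a start pivot (r - 1)

-- ---- the partition loop: permutation, pivot placement, partition bounds, frame, value-bound transfer ----

theorem qsOuter_spec (s e p : Int) :
    ∀ (fuel : Nat) (a : List Int) (left right : Int),
      0 ≤ s → e < (a.length : Int) →
      s + 1 ≤ left → left ≤ right → right ≤ e →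
      pyGetA a s = p →
      (∀ j : Int, s + 1 ≤ j → j < left → pyGetA a j ≤ p) →
      (∀ j : Int, right < j → j ≤ e → p ≤ pyGetA a j) →
      2 * (right - left).toNat + (if p < pyGetA a left then 1 else 0) +
        (if pyGetA a right < p then 1 else 0) + 2 ≤ fuel →
      (qsOuter fuel a s s e left right).1.Perm a ∧
      s ≤ (qsOuter fuel a s s e left right).2 ∧
      (qsOuter fuel a s s e left right).2 ≤ e ∧
      pyGetA (qsOuter fuel a s s e left right).1 (qsOuter fuel a s s e left right).2 = p ∧
      (∀ j : Int, s ≤ j → j < (qsOuter fuel a s s e left right).2 →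
        pyGetA (qsOuter fuel a s s e left right).1 j ≤ p) ∧
      (∀ j : Int, (qsOuter fuel a s s e left right).2 < j → j ≤ e →
        p ≤ pyGetA (qsOuter fuel a s s e left right).1 j) ∧
      (∀ j : Int, 0 ≤ j → (j < s ∨ e < j) →
        pyGetA (qsOuter fuel a s s e left right).1 j = pyGetA a j) ∧
      (∀ b : Int, (∀ j : Int, s ≤ j → j ≤ e → pyGetA a j ≤ b) →
        ∀ j : Int, s ≤ j → j ≤ e → pyGetA (qsOuter fuel a s s e left right).1 j ≤ b) ∧
      (∀ b : Int, (∀ j : Int, s ≤ j → j ≤ e → b ≤ pyGetA a j) →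
        ∀ j : Int, s ≤ j → j ≤ e → b ≤ pyGetA (qsOuter fuel a s s e left right).1 j) := by
  intro fuel
  induction fuel with
  | zero =>
    intro a left right _ _ _ _ _ _ _ _ hfuel
    split_ifs at hfuel <;> omega
  | succ f ih =>
    intro a left right hs0 hlen hleft hlr hre hp hbelow habove hfuel
    have hslen : s < (a.length : Int) := by omega
    set l' := qsLeft a s e left with hl'def
    set r' := qsRight a s s right with hr'def
    have key : qsOuter (f + 1) a s s e left right =
        if l' > r' then qsOuter f (pySwapA a s r') s s e l' r'
        else qsOuter f (pySwapA a l' r') s s e l' r' := by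
      simp only [qsOuter]
      rw [if_pos hlr]
    have hL1 : left ≤ l' := qsLeft_ge a s e left
    have hL2 : l' ≤ e + 1 := qsLeft_le a s e left (by omega)
    have hR1 : r' ≤ right := qsRight_le a s s right
    have hR2 : s ≤ r' := qsRight_ge a s s right (by omega)
    have belowExt : ∀ j : Int, s + 1 ≤ j → j < l' → pyGetA a j ≤ p := by
      intro j h1 h2
      rcases lt_or_ge j left with h | h
      · exact hbelow j h1 h
      · have := qsLeft_scan a s e left j h h2
        rwa [hp] at this
    have aboveExt : ∀ j : Int, r' < j → j ≤ e → p ≤ pyGetA a j := by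
      intro j h1 h2
      rcases le_or_gt j right with h | h
      · have := qsRight_scan a s s right j h1 h
        rwa [hp] at this
      · exact habove j h h2
    by_cases hcmp : r' < l'
    · -- exit iteration: swap pivot with r', loop test fails next time
      have hf1 : 1 ≤ f := by split_ifs at hfuel <;> omega
      obtain ⟨f', rfl⟩ : ∃ f', f = f' + 1 := ⟨f - 1, by omega⟩
      have hdone : qsOuter (f' + 1) (pySwapA a s r') s s e l' r' = (pySwapA a s r', r') := by
        simp only [qsOuter]
        rw [if_neg (by omega)]
      rw [key, if_pos hcmp, hdone]
      have hr'0 : (0:Int) ≤ r' := by omega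
      have hr'len : r' < (a.length : Int) := by omega
      have getS := pyGetA_pySwapA a s r' hs0 hslen hr'0 hr'len
      have har' : pyGetA a r' ≤ p := by
        rcases eq_or_lt_of_le hR2 with h | h
        · rw [← h, hp]
        · have h2 := qsRight_stop a s s right
          rw [← hr'def] at h2
          have := h2 h
          rw [hp] at this; omega
      refine ⟨perm_pySwapA a s r' hs0 hslen hr'0 hr'len, hR2, by omega, ?_, ?_, ?_, ?_, ?_, ?_⟩
      · rw [getS r' hr'0, if_pos rfl, hp]
      · intro j hj1 hj2
        rw [getS j (by omega), if_neg (by omega)]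
        by_cases hjs : j = s
        · rw [if_pos hjs]; exact har'
        · rw [if_neg hjs]
          exact belowExt j (by omega) (by omega)
      · intro j hj1 hj2
        rw [getS j (by omega), if_neg (by omega), if_neg (by omega)]
        exact aboveExt j (by omega) hj2
      · intro j hj0 hj
        rw [getS j hj0, if_neg (by omega), if_neg (by omega)]
      · intro b hb j hj1 hj2
        rw [getS j (by omega)]
        split_ifs with h1 h2
        · exact hb s (by omega) (by omega)
        · exact hb r' (by omega) (by omega)
        · exact hb j hj1 hj2
      · intro b hb j hj1 hj2
        rw [getS j (by omega)]
        split_ifs with h1 h2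
        · exact hb s (by omega) (by omega)
        · exact hb r' (by omega) (by omega)
        · exact hb j hj1 hj2
    · -- continue iteration: swap a[l'] with a[r'] and loop
      have hlr2 : l' ≤ r' := by omega
      rw [key, if_neg (by omega)]
      have hsr' : s < r' := by omega
      have stopR : pyGetA a r' < p := by
        have h2 := qsRight_stop a s s right
        rw [← hr'def] at h2
        have := h2 hsr'
        rwa [hp] at this
      have stopL : p < pyGetA a l' := by
        have h2 := qsLeft_stop a s e left
        rw [← hl'def] at h2
        have := h2 (by omega)
        rwa [hp] at this
      have hne : l' ≠ r' := by
        intro hh; rw [hh] at stopL; omega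
      have hl'0 : (0:Int) ≤ l' := by omega
      have hl'len : l' < (a.length : Int) := by omega
      have hr'0 : (0:Int) ≤ r' := by omega
      have hr'len : r' < (a.length : Int) := by omega
      have getS := pyGetA_pySwapA a l' r' hl'0 hl'len hr'0 hr'len
      have e1 : pyGetA (pySwapA a l' r') l' = pyGetA a r' := by
        rw [getS l' hl'0, if_neg hne, if_pos rfl]
      have e2 : pyGetA (pySwapA a l' r') r' = pyGetA a l' := by
        rw [getS r' hr'0, if_pos rfl]
      have harith : 2 * (r' - l').toNat + 2 ≤ f := by
        split_ifs at hfuel with h1 h2 h2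
        · omega
        · have hadvR : r' ≤ right - 1 :=
            qsRight_advance a s s right (by omega) (by rw [hp]; omega)
          omega
        · have hadvL : left + 1 ≤ l' :=
            qsLeft_advance a s e left (by omega) (by rw [hp]; omega)
          omega
        · have hadvR : r' ≤ right - 1 :=
            qsRight_advance a s s right (by omega) (by rw [hp]; omega)
          have hadvL : left + 1 ≤ l' :=
            qsLeft_advance a s e left (by omega) (by rw [hp]; omega)
          omega
      obtain ⟨P1, P2, P3, P4, P5, P6, P7, P8, P9⟩ :=
        ih (pySwapA a l' r') l' r' hs0
          (by rw [length_pySwapA a l' r' hl'0 hr'0]; exact hlen)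
          (by omega) hlr2 (by omega)
          (by rw [getS s hs0, if_neg (by omega), if_neg (by omega)]; exact hp)
          (by intro j h1 h2
              rw [getS j (by omega), if_neg (by omega), if_neg (by omega)]
              exact belowExt j h1 h2)
          (by intro j h1 h2
              rw [getS j (by omega), if_neg (by omega), if_neg (by omega)]
              exact aboveExt j h1 h2)
          (by rw [e1, e2, if_neg (by omega), if_neg (by omega)]; omega)
      refine ⟨P1.trans (perm_pySwapA a l' r' hl'0 hl'len hr'0 hr'len), P2, P3, P4, P5, P6, ?_, ?_, ?_⟩
      · intro j hj0 hj
        rw [P7 j hj0 hj, getS j hj0, if_neg (by omega), if_neg (by omega)]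
      · intro b hb j hj1 hj2
        refine P8 b ?_ j hj1 hj2
        intro k hk1 hk2
        rw [getS k (by omega)]
        split_ifs with h1 h2
        · exact hb l' (by omega) (by omega)
        · exact hb r' (by omega) (by omega)
        · exact hb k hk1 hk2
      · intro b hb j hj1 hj2
        refine P9 b ?_ j hj1 hj2
        intro k hk1 hk2
        rw [getS k (by omega)]
        split_ifs with h1 h2
        · exact hb l' (by omega) (by omega)
        · exact hb r' (by omega) (by omega)
        · exact hb k hk1 hk2

-- ---- quick_sort: permutation, frame, sortedness of the segment, value-bound transfer ----

theorem qsA_spec :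
    ∀ (fuel : Nat) (a : List Int) (s e : Int),
      0 ≤ s → e < (a.length : Int) → (e - s).toNat + 1 ≤ fuel →
      (quickSortA fuel a s e).Perm a ∧
      (∀ j : Int, 0 ≤ j → (j < s ∨ e < j) →
        pyGetA (quickSortA fuel a s e) j = pyGetA a j) ∧
      (∀ i j : Int, s ≤ i → i ≤ j → j ≤ e →
        pyGetA (quickSortA fuel a s e) i ≤ pyGetA (quickSortA fuel a s e) j) ∧
      (∀ b : Int, (∀ j : Int, s ≤ j → j ≤ e → pyGetA a j ≤ b) →
        ∀ j : Int, s ≤ j → j ≤ e → pyGetA (quickSortA fuel a s e) j ≤ b) ∧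
      (∀ b : Int, (∀ j : Int, s ≤ j → j ≤ e → b ≤ pyGetA a j) →
        ∀ j : Int, s ≤ j → j ≤ e → b ≤ pyGetA (quickSortA fuel a s e) j) := by
  intro fuel
  induction fuel with
  | zero => intro a s e _ _ hfuel; omega
  | succ f ih =>
    intro a s e hs0 hlen hfuel
    by_cases hse : s ≥ e
    · have key : quickSortA (f + 1) a s e = a := by
        simp only [quickSortA]; rw [if_pos hse]
      rw [key]
      refine ⟨List.Perm.refl a, fun j _ _ => rfl, ?_, fun b hb j h1 h2 => hb j h1 h2,
        fun b hb j h1 h2 => hb j h1 h2⟩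
      intro i j h1 h2 h3
      have : i = j := by omega
      rw [this]
    · obtain ⟨Q1, Q2, Q3, Q4, Q5, Q6, Q7, Q8, Q9⟩ :=
        qsOuter_spec s e (pyGetA a s) (2 * (e - s).toNat + 4) a (s + 1) e
          hs0 hlen (by omega) (by omega) (by omega) rfl
          (by intro j h1 h2; omega)
          (by intro j h1 h2; omega)
          (by split_ifs <;> omega)
      set a1 := (qsOuter (2 * (e - s).toNat + 4) a s s e (s + 1) e).1 with ha1
      set r := (qsOuter (2 * (e - s).toNat + 4) a s s e (s + 1) e).2 with hr
      have key : quickSortA (f + 1) a s e =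
          quickSortA f (quickSortA f a1 s (r - 1)) (r + 1) e := by
        simp only [quickSortA]
        rw [if_neg (by omega)]
      have hlen1 : a1.length = a.length := Q1.length_eq
      obtain ⟨R1, R2, R3, R4, R5⟩ :=
        ih a1 s (r - 1) hs0 (by rw [hlen1]; omega) (by omega)
      set a2 := quickSortA f a1 s (r - 1) with ha2
      have hlen2 : a2.length = a1.length := R1.length_eq
      obtain ⟨S1, S2, S3, S4, S5⟩ :=
        ih a2 (r + 1) e (by omega) (by rw [hlen2, hlen1]; omega) (by omega)
      rw [key]
      have vr_a2 : pyGetA a2 r = pyGetA a s := by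
        rw [R2 r (by omega) (by omega)]; exact Q4
      have low_a2 : ∀ j : Int, s ≤ j → j ≤ r - 1 → pyGetA a2 j ≤ pyGetA a s := by
        intro j h1 h2
        exact R4 (pyGetA a s) (fun k hk1 hk2 => Q5 k hk1 (by omega)) j h1 h2
      have frame2 : ∀ j : Int, 0 ≤ j → j ≤ r → pyGetA (quickSortA f a2 (r + 1) e) j = pyGetA a2 j := by
        intro j h1 h2
        exact S2 j h1 (by omega)
      have vr_res : pyGetA (quickSortA f a2 (r + 1) e) r = pyGetA a s := by
        rw [frame2 r (by omega) (by omega)]; exact vr_a2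
      have low_res : ∀ j : Int, s ≤ j → j ≤ r - 1 →
          pyGetA (quickSortA f a2 (r + 1) e) j ≤ pyGetA a s := by
        intro j h1 h2
        rw [frame2 j (by omega) (by omega)]
        exact low_a2 j h1 h2
      have high_res : ∀ j : Int, r + 1 ≤ j → j ≤ e →
          pyGetA a s ≤ pyGetA (quickSortA f a2 (r + 1) e) j := by
        intro j h1 h2
        refine S5 (pyGetA a s) ?_ j h1 h2
        intro k hk1 hk2
        rw [R2 k (by omega) (by omega)]
        exact Q6 k (by omega) hk2
      refine ⟨S1.trans (R1.trans Q1), ?_, ?_, ?_, ?_⟩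
      · intro j hj0 hj
        rw [S2 j hj0 (by omega), R2 j hj0 (by omega), Q7 j hj0 (by omega)]
      · intro i j h1 h2 h3
        rcases lt_trichotomy i r with hi | hi | hi
        · rcases lt_trichotomy j r with hj | hj | hj
          · rw [frame2 i (by omega) (by omega), frame2 j (by omega) (by omega)]
            exact R3 i j h1 h2 (by omega)
          · rw [hj, vr_res]; exact low_res i h1 (by omega)
          · exact le_trans (low_res i h1 (by omega)) (high_res j (by omega) h3)
        · rw [hi, vr_res]
          rcases eq_or_lt_of_le h2 with hj | hj
          · rw [← hj, hi, vr_res]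
          · exact high_res j (by omega) h3
        · exact S3 i j (by omega) h2 h3
      · intro b hb j h1 h2
        have hba1 : ∀ k : Int, s ≤ k → k ≤ e → pyGetA a1 k ≤ b := Q8 b hb
        rcases lt_trichotomy j r with hj | hj | hj
        · rw [frame2 j (by omega) (by omega)]
          exact R4 b (fun k hk1 hk2 => hba1 k hk1 (by omega)) j h1 (by omega)
        · rw [hj, frame2 r (by omega) (by omega), R2 r (by omega) (by omega)]
          exact hba1 r (by omega) (by omega)
        · refine S4 b ?_ j (by omega) h2
          intro k hk1 hk2
          rw [R2 k (by omega) (by omega)]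
          exact hba1 k (by omega) hk2
      · intro b hb j h1 h2
        have hba1 : ∀ k : Int, s ≤ k → k ≤ e → b ≤ pyGetA a1 k := Q9 b hb
        rcases lt_trichotomy j r with hj | hj | hj
        · rw [frame2 j (by omega) (by omega)]
          exact R5 b (fun k hk1 hk2 => hba1 k hk1 (by omega)) j h1 (by omega)
        · rw [hj, frame2 r (by omega) (by omega), R2 r (by omega) (by omega)]
          exact hba1 r (by omega) (by omega)
        · refine S5 b ?_ j (by omega) h2
          intro k hk1 hk2
          rw [R2 k (by omega) (by omega)]
          exact hba1 k (by omega) hk2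

-- ---- the counting loop of A computes (zeros, non-zero hits) ----

theorem countFold (g : Int → Prop) [DecidablePred g] :
    ∀ (l : List Int) (b c : Int),
      l.foldl (fun (st : Int × Int) x =>
          if x = 0 then (st.1 + 1, st.2) else if g x then (st.1, st.2 + 1) else st) (b, c)
        = (b + (l.count 0 : Int), c + ((l.countP fun x => decide (x ≠ 0) && decide (g x)) : Int)) := by
  intro l
  induction l with
  | nil => intro b c; simp
  | cons x xs ih =>
    intro b c
    simp only [List.foldl_cons]
    by_cases hx : x = 0
    · rw [if_pos hx, ih]
      simp [hx]
      omega
    · by_cases hg : g x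
      · rw [if_neg hx, if_pos hg, ih]
        simp [hx, hg]
        try omega
      · rw [if_neg hx, if_neg hg, ih]
        simp [hx, hg]
        try omega

-- ---- B's recursive boolean search takes exactly the probe path of A's iterative one ----

theorem bsFind_eq (ws : List Int) (t : Int) :
    ∀ s e : Int, 0 ≤ s → bsFind ws s e t = decide (0 ≤ bsLoop ws t s e) := by
  apply bsLoop.induct ws t
    (motive := fun s e => 0 ≤ s → bsFind ws s e t = decide (0 ≤ bsLoop ws t s e))
  · intro s e hse hhit hs0
    have hmid := PySem.Int.floordiv_two_mid_bounds hse
    rw [bsFind, bsLoop, dif_neg (by omega : ¬ s > e), dif_pos hse, if_pos hhit, if_pos hhit]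
    simp
    omega
  · intro s e hse hne hlt ih hs0
    have hmid := PySem.Int.floordiv_two_mid_bounds hse
    rw [bsFind, bsLoop, dif_neg (by omega : ¬ s > e), dif_pos hse, if_neg hne, if_neg hne,
      if_pos hlt, if_pos hlt]
    exact ih (by omega)
  · intro s e hse hne hnlt ih hs0
    have hmid := PySem.Int.floordiv_two_mid_bounds hse
    rw [bsFind, bsLoop, dif_neg (by omega : ¬ s > e), dif_pos hse, if_neg hne, if_neg hne,
      if_neg hnlt, if_neg hnlt]
    exact ih hs0
  · intro s e hse hs0
    rw [bsFind, bsLoop, dif_pos (by omega : s > e), dif_neg hse]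
    simp

-- ---- A's quick_sort on win_nums[0:6] produces sorted(win_nums[:6]) ++ win_nums[6:] ----

theorem qs_eq_sorted_prefix (w : List Int) (hw : 6 ≤ w.length) :
    quickSortA (((6:Int) - 1 - 0).toNat + 1) w 0 (6 - 1)
      = PySem.List.sorted (w.take 6) (fun x => x) ++ w.drop 6 := by
  have hwI : (6:Int) ≤ (w.length : Int) := by exact_mod_cast hw
  obtain ⟨hperm, hframe, hsort, _, _⟩ :=
    qsA_spec (((6:Int) - 1 - 0).toNat + 1) w 0 (6 - 1) (by norm_num) (by omega) (by omega)
  set res := quickSortA (((6:Int) - 1 - 0).toNat + 1) w 0 (6 - 1) with hres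
  have hlen : res.length = w.length := hperm.length_eq
  have hr6 : 6 ≤ res.length := by omega
  have htail : ∀ k : Nat, 6 ≤ k → (hk : k < w.length) → res[k]'(by omega) = w[k]'hk := by
    intro k h1 hk
    have h3 := hframe (k : Int) (by omega) (by right; push_cast; omega)
    rw [pyGetA_eq res (k : Int) (by omega) (by push_cast [hlen]; omega),
      pyGetA_eq w (k : Int) (by omega) (by omega)] at h3
    simpa using h3
  have hdrop : res.drop 6 = w.drop 6 := by
    apply List.ext_getElem
    · simp [hlen]
    · intro k hk1 hk2
      simp only [List.getElem_drop]
      exact htail (6 + k) (by omega) (by simp at hk2; omega)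
  have h6 : (res.take 6).length = 6 := by rw [List.length_take]; omega
  have hpair : List.Pairwise (fun x y : Int => x ≤ y) (res.take 6) := by
    rw [List.pairwise_iff_getElem]
    intro i j hi hj hij
    rw [h6] at hi hj
    simp only [List.getElem_take]
    have h5 := hsort (i : Int) (j : Int) (by omega) (by exact_mod_cast Nat.le_of_lt hij)
      (by omega)
    rw [pyGetA_eq res (i : Int) (by omega) (by omega),
      pyGetA_eq res (j : Int) (by omega) (by omega)] at h5
    simpa using h5
  have hpermTake : (res.take 6).Perm (w.take 6) := by
    have h1 : res.take 6 ++ w.drop 6 = res := by rw [← hdrop]; exact List.take_append_drop 6 res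
    have h2 : w.take 6 ++ w.drop 6 = w := List.take_append_drop 6 w
    have h3 : (res.take 6 ++ w.drop 6).Perm (w.take 6 ++ w.drop 6) := by
      rw [h1, h2]; exact hperm
    exact (List.perm_append_right_iff _).mp h3
  calc res = res.take 6 ++ res.drop 6 := (List.take_append_drop 6 res).symm
    _ = PySem.List.sorted (w.take 6) (fun x => x) ++ w.drop 6 := by
        rw [hdrop, PySem.List.sorted_id_eq_of_perm_of_pairwise (w.take 6) (res.take 6) hpermTake hpair]

-- ---- B's filtered 1-sum is a countP ----

theorem sum_ones_filter (l : List Int) (p : Int → Bool) :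
    ((l.filter p).map (fun _ => (1 : Int))).sum = ((l.countP p : Nat) : Int) := by
  rw [List.countP_eq_length_filter]
  induction l.filter p with
  | nil => simp
  | cons x xs ih =>
    simp only [List.map_cons, List.sum_cons, List.length_cons, ih]
    push_cast
    ring

-- ---- '[lottos[i] for i in range(6)]' is lottos.take 6 (when 6 <= len lottos) ----

theorem range6_map_pyGetD (l : List Int) (hl : 6 ≤ l.length) :
    (PySem.List.pyRange 0 6 1).map (fun i => PySem.List.pyGetD l i 0) = l.take 6 := by
  have hlI : (6:Int) ≤ (l.length : Int) := by exact_mod_cast hl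
  have hstep : (PySem.List.pyRange 0 6 1).map (fun i => PySem.List.pyGetD l i 0)
      = (PySem.List.pyRange 0 6 1).map (fun i => PySem.List.pyGetD (l.take 6) i 0) := by
    apply List.map_congr_left
    intro x hx
    rw [PySem.List.mem_pyRange_one] at hx
    obtain ⟨hx0, hx6⟩ := hx
    rw [PySem.List.pyGetD_eq_getElem l 0 hx0 (by omega),
      PySem.List.pyGetD_eq_getElem (l.take 6) 0 hx0 (by rw [List.length_take]; push_cast; omega),
      List.getElem_take]
  rw [hstep, show (6:Int) = (((l.take 6).length : Nat) : Int) by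
    rw [List.length_take]; push_cast; omega]
  exact PySem.List.map_pyGetD_pyRange_zero (l.take 6) 0

-- ===== VERDICT (by name: the statement is the Claim_ definition above) =====
theorem solution_spec : Claim_equal_solution := by
  intro lottos win_nums _hdom hpre
  obtain ⟨hl, hw⟩ := hpre
  have hlI : (6:Int) ≤ (lottos.length : Int) := by exact_mod_cast hl
  show solution lottos win_nums = solution_alt lottos win_nums
  simp only [solution, solution_alt]
  rw [qs_eq_sorted_prefix win_nums hw,
    PySem.List.slice_from win_nums (by norm_num : (0:Int) ≤ 6),
    PySem.List.slice_to win_nums (by norm_num : (0:Int) ≤ 6),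
    range6_map_pyGetD lottos hl]
  simp only [show ((6:Int)).toNat = 6 from rfl]
  set ws := PySem.List.sorted (win_nums.take 6) (fun x => x) ++ win_nums.drop 6 with hws
  have hfold :
      (PySem.List.pyRange 0 6 1).foldl
        (fun (st : Int × Int) i =>
          if PySem.List.pyGetD lottos i 0 = 0 then (st.1 + 1, st.2)
          else if binarySearch ws (PySem.List.pyGetD lottos i 0) ≥ 0 then (st.1, st.2 + 1)
          else st) (0, 0)
        = (lottos.take 6).foldl
            (fun (st : Int × Int) x =>
              if x = 0 then (st.1 + 1, st.2)
              else if binarySearch ws x ≥ 0 then (st.1, st.2 + 1) else st) (0, 0) := by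
    have hstep :
        (PySem.List.pyRange 0 6 1).foldl
          (fun (st : Int × Int) i =>
            if PySem.List.pyGetD lottos i 0 = 0 then (st.1 + 1, st.2)
            else if binarySearch ws (PySem.List.pyGetD lottos i 0) ≥ 0 then (st.1, st.2 + 1)
            else st) (0, 0)
          = (PySem.List.pyRange 0 6 1).foldl
            (fun (st : Int × Int) i =>
              if PySem.List.pyGetD (lottos.take 6) i 0 = 0 then (st.1 + 1, st.2)
              else if binarySearch ws (PySem.List.pyGetD (lottos.take 6) i 0) ≥ 0 then
                (st.1, st.2 + 1)
              else st) (0, 0) := by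
      refine PySem.List.foldl_congr_mem _ _ _ _ ?_
      intro acc x hx
      rw [PySem.List.mem_pyRange_one] at hx
      obtain ⟨hx0, hx6⟩ := hx
      have hget : PySem.List.pyGetD lottos x 0 = PySem.List.pyGetD (lottos.take 6) x 0 := by
        rw [PySem.List.pyGetD_eq_getElem lottos 0 hx0 (by omega),
          PySem.List.pyGetD_eq_getElem (lottos.take 6) 0 hx0
            (by rw [List.length_take]; push_cast; omega),
          List.getElem_take]
      rw [hget]
    rw [hstep, show (6:Int) = (((lottos.take 6).length : Nat) : Int) by
      rw [List.length_take]; push_cast; omega]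
    exact PySem.List.foldl_pyRange_zero_pyGetD' (lottos.take 6) 0
      (fun (st : Int × Int) x =>
        if x = 0 then (st.1 + 1, st.2)
        else if binarySearch ws x ≥ 0 then (st.1, st.2 + 1) else st) ((0:Int), (0:Int))
  rw [hfold, countFold (fun x => binarySearch ws x ≥ 0) (lottos.take 6) 0 0,
    sum_ones_filter (lottos.take 6)
      (fun x => !(x == 0) && bsFind ws 0 (PySem.List.len ws - 1) x)]
  have hcp : ((lottos.take 6).countP fun x => decide (x ≠ 0) && decide (binarySearch ws x ≥ 0))
      = (lottos.take 6).countP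
          (fun x => !(x == 0) && bsFind ws 0 (PySem.List.len ws - 1) x) := by
    refine List.countP_congr ?_
    intro x _
    have hb : bsFind ws 0 ((ws.length : Int) - 1) x
        = decide (0 ≤ bsLoop ws x 0 ((ws.length : Int) - 1)) :=
      bsFind_eq ws x 0 ((ws.length : Int) - 1) (by omega)
    simp [binarySearch, hb, ge_iff_le]
  rw [hcp]
  rw [PySem.List.count_eq]
  norm_num
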